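-- pv_equiv track=rewrite | github.com/sojukang/programmers-kang- | sojukang/new_id_recommendation.py | solution
-- ===== SOURCE A (Python) =====
-- def solution(new_id):
--     answer = ''
--     word_allowed = ['-', '_']
--     # 1단계
--     new_id = new_id.lower()
--
--     for i in range(len(new_id)):
--         # 2단계
--         if new_id[i] in word_allowed or new_id[i].isalnum():
--             answer += new_id[i]
--
--         # 3단계
--         if new_id[i] == '.':
--             if answer and answer[-1] == '.':
--                 continue
--             else:
--                 answer += new_id[i]
--
--     # 4단계
--     if answer and answer[0] == '.':
--         answer = answer[1:]
--
--     if answer and answer[-1] == '.':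
--         answer = answer[:-1]
--
--     # 5단계
--     if not answer:
--         answer = 'a'
--
--     # 6단계
--     answer = answer[:15]
--     if answer and answer[-1] == '.':
--         answer = answer[:-1]
--
--     # 7단계
--     while len(answer) < 3:
--         if answer:
--             answer += answer[-1]
--
--     return answer
-- ===== SOURCE B (Python) =====
-- def solution(new_id):
--     s = new_id.lower()
--     s = ''.join(c for c in s if c.isalnum() or c in '-_.')
--     s = '.'.join(p for p in s.split('.') if p)
--     if not s:
--         s = 'a'
--     s = s[:15]
--     if s.endswith('.'):
--         s = s[:-1]
--     if len(s) < 3: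
--         s = s + s[-1] * (3 - len(s))
--     return s
-- ===== Notes on version B (the rewrite author's own statement) =====
-- stated objective: idiomatic
-- what changed: Replaces A's single index loop with an interleaved append/dot-suppression accumulator by a filter/split/join pipeline: keep the allowed characters, split on the dot character and rejoin the nonempty parts (which collapses dot runs and strips boundary dots in one step), then the same tail stages with arithmetic padding instead of a while loop.
import Mathlib
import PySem

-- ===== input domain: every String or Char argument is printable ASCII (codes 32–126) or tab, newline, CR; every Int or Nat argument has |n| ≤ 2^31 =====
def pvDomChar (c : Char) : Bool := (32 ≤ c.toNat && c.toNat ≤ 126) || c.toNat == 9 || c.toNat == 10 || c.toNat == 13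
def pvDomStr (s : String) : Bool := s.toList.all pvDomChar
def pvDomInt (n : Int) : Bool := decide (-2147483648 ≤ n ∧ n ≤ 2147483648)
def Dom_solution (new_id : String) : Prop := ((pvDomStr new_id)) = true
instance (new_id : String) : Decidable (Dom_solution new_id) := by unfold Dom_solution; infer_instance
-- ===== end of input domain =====

-- B replaces A's single accumulator loop (char append + dot-suppression interleaved) by a
-- filter / split-on-dot / join-nonempty-parts pipeline with arithmetic padding (idiomatic; same asymptotic cost).

-- ===== PORT A =====
-- A's loop body: step 2 (allowed chars appended) then step 3 (dot appended unless answer ends in '.')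
def stepA (answer : List Char) (ch : Char) : List Char :=
  let answer := if (['-', '_'] : List Char).contains ch || PySem.Chars.isalnum ch
                then answer ++ [ch] else answer
  if ch = '.' then
    if answer ≠ [] ∧ answer.getLast? = some '.' then answer else answer ++ [ch]
  else answer

-- A's step 7: `while len(answer) < 3: if answer: answer += answer[-1]`
-- (the guard `l ≠ []` also terminates the recursion where Python would loop forever on an
--  empty answer — that state is unreachable in `solution`)
def padA (l : List Char) : List Char :=
  if h : l.length < 3 ∧ l ≠ [] then padA (l ++ [l.getLast h.2])
  else l
termination_by 3 - l.length
decreasing_by simp [List.length_append]; omega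

def solution (new_id : String) : String :=
  let s := (PySem.Str.lower new_id).toList
  let answer : List Char := s.foldl stepA []
  let answer := if answer ≠ [] ∧ answer.head? = some '.' then answer.tail else answer
  let answer := if answer ≠ [] ∧ answer.getLast? = some '.' then answer.dropLast else answer
  let answer := if answer = [] then ['a'] else answer
  let answer := answer.take 15
  let answer := if answer ≠ [] ∧ answer.getLast? = some '.' then answer.dropLast else answer
  String.mk (padA answer)

-- ===== PORT B =====
-- Source B's `c.isalnum() or c in '-_.'`
def keepB (c : Char) : Bool := PySem.Chars.isalnum c || (['-', '_', '.'] : List Char).contains c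

-- Source B's `s.split('.')` (Python str.split with a one-char separator, empty parts kept)
def pysplitDot : List Char → List (List Char)
  | [] => [[]]
  | c :: t =>
    if c = '.' then [] :: pysplitDot t
    else match pysplitDot t with
      | [] => [[c]]
      | p :: ps => (c :: p) :: ps

-- Source B's `'.'.join(parts)`
def pyjoinDot : List (List Char) → List Char
  | [] => []
  | [p] => p
  | p :: q :: ps => p ++ '.' :: pyjoinDot (q :: ps)

def solution_alt (new_id : String) : String :=
  let s := (PySem.Str.lower new_id).toList.filter keepB
  let s := pyjoinDot ((pysplitDot s).filter (· ≠ []))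
  let s := if s = [] then ['a'] else s
  let s := s.take 15
  let s := if s.getLast? = some '.' then s.dropLast else s
  let s := if s.length < 3 then s ++ List.replicate (3 - s.length) (s.getLastD 'a') else s
  String.mk s

-- ===== PRECONDITION & SPEC =====
def Spec_solution (new_id : String) (out : String) : Prop := out = solution_alt new_id
instance (new_id : String) (out : String) : Decidable (Spec_solution new_id out) := by unfold Spec_solution; infer_instance

-- ===== CLAIM (what is proved, stated in full; the proofs are below) =====
def Claim_equal_solution : Prop := ∀ (new_id : String), Dom_solution new_id → Spec_solution new_id (solution new_id)

-- ===== LEMMAS AND PROOFS =====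

-- collapse of consecutive dots, with flag b = "last emitted char is a dot"
def colP : Bool → List Char → List Char
  | _, [] => []
  | b, c :: t =>
    if c = '.' then (if b then colP true t else '.' :: colP true t)
    else c :: colP false t

def jp (u : List Char) : List Char := pyjoinDot ((pysplitDot u).filter (· ≠ []))

def sL (x : List Char) : List Char := if x.head? = some '.' then x.tail else x
def sT (x : List Char) : List Char := if x.getLast? = some '.' then x.dropLast else x

theorem foldl_stepA (u : List Char) : ∀ acc : List Char,
    u.foldl stepA acc = acc ++ colP (decide (acc.getLast? = some '.')) (u.filter keepB) := by
  induction u with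
  | nil => intro acc; simp [colP]
  | cons c t ih =>
    intro acc
    by_cases hc : c = '.'
    · subst hc
      have hk : keepB '.' = true := by decide
      by_cases hb : acc.getLast? = some '.'
      · have hne : acc ≠ [] := by intro h; simp [h] at hb
        simp only [List.foldl_cons, List.filter_cons, hk, if_pos rfl]
        have hstep : stepA acc '.' = acc := by
          have hpd : PySem.Chars.isalnum '.' = false := by decide
          simp [stepA, hpd, hb, hne]
        rw [hstep, ih acc]
        simp [colP, hb]
      · simp only [List.foldl_cons, List.filter_cons, hk, if_pos rfl]
        have hstep : stepA acc '.' = acc ++ ['.'] := by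
          have hpd : PySem.Chars.isalnum '.' = false := by decide
          simp [stepA, hpd, hb]
        rw [hstep, ih (acc ++ ['.'])]
        simp [colP, hb, List.getLast?_append]
    · by_cases hk : keepB c = true
      · have hcond : ((['-', '_'] : List Char).contains c || PySem.Chars.isalnum c) = true := by
          by_cases ha : PySem.Chars.isalnum c = true
          · simp [ha]
          · have h2 : c = '-' ∨ c = '_' := by
              simp only [keepB, Bool.or_eq_true, List.contains_eq_mem, List.mem_cons,
                List.not_mem_nil, or_false, decide_eq_true_eq] at hk
              rcases hk with h | h | h | h
              · exact absurd h ha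
              · exact Or.inl h
              · exact Or.inr h
              · exact absurd h hc
            rcases h2 with h | h <;> subst h <;> decide
        have hstep : stepA acc c = acc ++ [c] := by
          unfold stepA
          rw [hcond]
          simp [hc]
        simp only [List.foldl_cons, List.filter_cons, hk, if_pos rfl]
        rw [hstep, ih (acc ++ [c])]
        have : ((acc ++ [c]).getLast? = some '.') = False := by
          simp [List.getLast?_append, hc]
        simp [colP, this, hc]
      · have hkf : keepB c = false := by simpa using hk
        have hcond : ((['-', '_'] : List Char).contains c || PySem.Chars.isalnum c) = false := by
          simp only [keepB, Bool.or_eq_true, List.contains_eq_mem, List.mem_cons,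
            List.not_mem_nil, or_false, decide_eq_true_eq, not_or, Bool.not_eq_true] at hk
          simp only [List.contains_eq_mem, List.mem_cons, List.not_mem_nil, or_false,
            Bool.or_eq_false_iff, decide_eq_false_iff_not, not_or]
          exact ⟨⟨hk.2.1, hk.2.2.1⟩, hk.1⟩
        have hstep : stepA acc c = acc := by
          unfold stepA
          rw [hcond]
          simp [hc]
        simp only [List.foldl_cons, List.filter_cons, hkf]
        rw [hstep, ih acc]
        simp

theorem colP_true_eq (t : List Char) :
    colP true t = colP false (t.dropWhile (· = '.')) := by
  induction t with
  | nil => simp [colP]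
  | cons c t ih =>
    by_cases hc : c = '.'
    · subst hc; simpa [colP, List.dropWhile] using ih
    · simp [colP, hc, List.dropWhile]

theorem pysplitDot_ne_nil (u : List Char) : pysplitDot u ≠ [] := by
  cases u with
  | nil => simp [pysplitDot]
  | cons c t =>
    simp only [pysplitDot]
    split
    · simp
    · cases h : pysplitDot t <;> simp

theorem jp_dot_cons (t : List Char) : jp ('.' :: t) = jp t := by
  simp [jp, pysplitDot]

theorem jp_dropWhile (t : List Char) : jp (t.dropWhile (· = '.')) = jp t := by
  induction t with
  | nil => simp
  | cons c t ih =>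
    by_cases hc : c = '.'
    · subst hc; simpa [List.dropWhile, jp_dot_cons] using ih
    · simp [List.dropWhile, hc]

theorem mem_pysplitDot_no_dot (u : List Char) :
    ∀ p ∈ pysplitDot u, '.' ∉ p := by
  induction u with
  | nil => intro p hp; simp [pysplitDot] at hp; simp [hp]
  | cons c t ih =>
    intro p hp
    by_cases hc : c = '.'
    · subst hc
      have hps : pysplitDot ('.' :: t) = [] :: pysplitDot t := by simp [pysplitDot]
      rw [hps] at hp
      rcases List.mem_cons.1 hp with h | h
      · simp [h]
      · exact ih p h
    · simp only [pysplitDot, if_neg hc] at hp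
      cases h : pysplitDot t with
      | nil => exact absurd h (pysplitDot_ne_nil t)
      | cons q qs =>
        rw [h] at hp
        simp only [List.mem_cons] at hp
        rcases hp with h1 | h1
        · subst h1
          intro hmem
          rcases List.mem_cons.1 hmem with h2 | h2
          · exact hc h2.symm
          · exact ih q (by simp [h]) h2
        · exact ih p (by simp [h, h1])

theorem pysplitDot_nodot_append (w : List Char) (hw : ∀ c ∈ w, c ≠ '.') :
    ∀ r p ps, pysplitDot r = p :: ps → pysplitDot (w ++ r) = (w ++ p) :: ps := by
  induction w with
  | nil => intro r p ps h; simpa using h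
  | cons c w ih =>
    intro r p ps h
    have hc : c ≠ '.' := hw c (by simp)
    have := ih (fun d hd => hw d (by simp [hd])) r p ps h
    simp only [List.cons_append, pysplitDot, if_neg hc, this]

theorem filter_pysplitDot_eq_nil_iff (r : List Char) :
    (pysplitDot r).filter (· ≠ []) = [] ↔ ∀ c ∈ r, c = '.' := by
  induction r with
  | nil => simp [pysplitDot]
  | cons c t ih =>
    by_cases hc : c = '.'
    · subst hc
      simp only [pysplitDot, if_pos rfl, List.filter_cons]
      simpa using ih
    · constructor
      · intro h
        exfalso
        simp only [pysplitDot, if_neg hc] at h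
        cases ht : pysplitDot t with
        | nil => exact pysplitDot_ne_nil t ht
        | cons q qs =>
          rw [ht] at h
          simp [List.filter_cons] at h
      · intro h; exact absurd (h c (by simp)) hc

theorem sT_append (a x : List Char) (hx : x ≠ []) : sT (a ++ x) = a ++ sT x := by
  unfold sT
  rw [List.getLast?_append]
  cases h : x.getLast? with
  | none => simp [List.getLast?_eq_none_iff] at h; exact absurd h hx
  | some c =>
    by_cases hc : c = '.'
    · subst hc
      simp [h, List.dropLast_append_of_ne_nil hx]
    · simp [h, hc]

theorem colP_nodot_append (w r : List Char) (hw : ∀ c ∈ w, c ≠ '.') (hne : w ≠ []) (b : Bool) :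
    colP b (w ++ r) = w ++ colP false r := by
  induction w generalizing b with
  | nil => exact absurd rfl hne
  | cons c w ih =>
    have hc : c ≠ '.' := hw c (by simp)
    by_cases hw' : w = []
    · subst hw'; simp [colP, hc]
    · have := ih (fun d hd => hw d (by simp [hd])) hw' false
      simp only [List.cons_append, colP, if_neg hc, this]

theorem sT_cons_dot (x : List Char) (hx : x ≠ []) : sT ('.' :: x) = '.' :: sT x := by
  cases x with
  | nil => exact absurd rfl hx
  | cons y ys =>
    unfold sT
    rw [List.getLast?_cons_cons]
    split_ifs with h
    · simp
    · rfl

theorem sT_nodot (w : List Char) (hw : ∀ d ∈ w, d ≠ '.') : sT w = w := by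
  unfold sT
  cases hl : w.getLast? with
  | none => simp
  | some e =>
    have he : e ∈ w := List.mem_of_getLast? hl
    simp [hw e he]

-- main combinatorial fact: A's collapse + strip-one-leading + strip-one-trailing dot
-- equals B's "join the nonempty dot-separated parts"
theorem core_eq : ∀ n (u : List Char), u.length ≤ n → sT (sL (colP false u)) = jp u := by
  intro n
  induction n with
  | zero =>
    intro u hu
    have : u = [] := List.eq_nil_of_length_eq_zero (Nat.le_zero.1 hu)
    subst this; decide
  | succ n ih =>
    intro u hu
    cases u with
    | nil => decide
    | cons c t =>
      by_cases hc : c = '.'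
      · subst hc
        have h1 : colP false ('.' :: t) = '.' :: colP false (t.dropWhile (· = '.')) := by
          simp [colP, colP_true_eq]
        set t' := t.dropWhile (· = '.') with ht'
        have hlen : t'.length ≤ n := by
          have h2 := List.length_dropWhile_le (· = '.') t
          rw [← ht'] at h2
          simp only [List.length_cons] at hu
          omega
        have hL : sL (colP false ('.' :: t)) = colP false t' := by
          rw [h1]; simp [sL]
        rw [hL]
        have hL2 : sL (colP false t') = colP false t' := by
          cases ht : t' with
          | nil => simp [colP, sL]
          | cons d t2 =>
            have hd : d ≠ '.' := by
              have h2 := List.head_dropWhile_not (p := (· = '.')) (l := t)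
              rw [← ht'] at h2
              have h3 := h2 (by simp [ht])
              simpa [ht] using h3
            simp [colP, hd, sL]
        rw [← hL2, ih t' hlen, ht', jp_dropWhile, jp_dot_cons]
      · -- split u into its dot-free leading block w and the rest r
        set w := (c :: t).takeWhile (fun d => ¬ d = '.') with hwdef
        set r := (c :: t).dropWhile (fun d => ¬ d = '.') with hrdef
        have hsplit : w ++ r = c :: t := List.takeWhile_append_dropWhile
        have hwne : w ≠ [] := by
          rw [hwdef]; simp [List.takeWhile, hc]
        have hwnd : ∀ d ∈ w, d ≠ '.' := by
          intro d hd
          have := List.mem_takeWhile_imp (hwdef ▸ hd)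
          simpa using this
        have hcol : colP false (c :: t) = w ++ colP false r := by
          rw [← hsplit]; exact colP_nodot_append w r hwnd hwne false
        have hheadw : ∃ d w2, w = d :: w2 ∧ d ≠ '.' := by
          cases hw : w with
          | nil => exact absurd hw hwne
          | cons d w2 => exact ⟨d, w2, rfl, hwnd d (by simp [hw])⟩
        obtain ⟨d, w2, hw, hd⟩ := hheadw
        have hLid : sL (colP false (c :: t)) = colP false (c :: t) := by
          rw [hcol, hw]; simp [sL, hd]
        rw [hLid, hcol]
        cases hr : r with
        | nil =>
          -- u = w, dot-free
          have hu' : c :: t = w := by rw [← hsplit, hr, List.append_nil]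
          have hcnil : colP false ([] : List Char) = [] := by simp [colP]
          rw [hcnil, List.append_nil, sT_nodot w hwnd]
          have hpsw : pysplitDot w = [w] := by
            have := pysplitDot_nodot_append w hwnd [] [] [] (by simp [pysplitDot])
            simpa using this
          rw [hu']
          simp [jp, hpsw, List.filter_cons, hwne, pyjoinDot]
        | cons e r2 =>
          have he : e = '.' := by
            have h2 := List.head_dropWhile_not (p := fun d => ¬ d = '.') (l := c :: t)
            rw [← hrdef] at h2
            have h3 := h2 (by simp [hr])
            simpa [hr] using h3
          subst he
          have hps : pysplitDot (c :: t) = w :: pysplitDot r2 := by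
            rw [← hsplit, hr]
            have h0 : pysplitDot ('.' :: r2) = [] :: pysplitDot r2 := by
              simp [pysplitDot]
            cases hq : pysplitDot r2 with
            | nil => exact absurd hq (pysplitDot_ne_nil r2)
            | cons q qs =>
              rw [hq] at h0
              have := pysplitDot_nodot_append w hwnd ('.' :: r2) [] (q :: qs) h0
              simpa [hq] using this
          have hcolr : colP false ('.' :: r2) = '.' :: colP false (r2.dropWhile (· = '.')) := by
            simp [colP, colP_true_eq]
          set r2' := r2.dropWhile (· = '.') with hr2'
          have hlen2 : r2'.length ≤ n := by
            have h4 := List.length_dropWhile_le (· = '.') r2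
            rw [← hr2'] at h4
            have h5 : w.length + ('.' :: r2).length = (c :: t).length := by
              rw [← hsplit, hr, List.length_append]
            have h6 : 1 ≤ w.length := by rw [hw]; simp
            simp only [List.length_cons] at h5 hu
            omega
          rw [hcolr]
          cases hr2 : r2' with
          | nil =>
            -- everything after w is dots
            have hall : ∀ x ∈ r2, x = '.' := by
              intro x hx
              by_contra hne
              have hne2 : r2' ≠ [] := by
                rw [hr2']
                intro hdw
                have := List.dropWhile_eq_nil_iff.1 hdw x hx
                simp at this
                exact hne this
              exact hne2 hr2
            have hfilter : (pysplitDot r2).filter (· ≠ []) = [] :=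
              (filter_pysplitDot_eq_nil_iff r2).2 hall
            have hsTw : sT (w ++ ['.']) = w := by
              rw [sT_append w ['.'] (by simp)]
              simp [sT]
            have hjp : jp (c :: t) = w := by
              have hfilter' : (pysplitDot r2).filter (fun x => !decide (x = [])) = [] := by
                simpa using hfilter
              simp [jp, hps, List.filter_cons, hwne, hfilter', pyjoinDot]
            rw [hjp]
            simpa [colP] using hsTw
          | cons g r3 =>
            rw [← hr2]
            have hg : g ≠ '.' := by
              have h2 := List.head_dropWhile_not (p := (· = '.')) (l := r2)
              rw [← hr2'] at h2
              have h3 := h2 (by simp [hr2])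
              simpa [hr2] using h3
            have hxne : colP false r2' ≠ [] := by
              rw [hr2]; simp [colP, hg]
            have hLid2 : sL (colP false r2') = colP false r2' := by
              rw [hr2]; simp [colP, hg, sL]
            have hstep : sT (w ++ '.' :: colP false r2') = w ++ '.' :: sT (colP false r2') := by
              rw [sT_append w ('.' :: colP false r2') (by simp), sT_cons_dot _ hxne]
            rw [hstep, ← hLid2, ih r2' hlen2]
            -- RHS side
            have hfne : (pysplitDot r2).filter (· ≠ []) ≠ [] := by
              intro hF
              have hall := (filter_pysplitDot_eq_nil_iff r2).1 hF
              have : r2' = [] := by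
                rw [hr2']
                exact List.dropWhile_eq_nil_iff.2 (fun x hx => by simp [hall x hx])
              rw [hr2] at this; exact List.cons_ne_nil _ _ this
            have hjp2 : jp r2' = jp r2 := by rw [hr2']; exact jp_dropWhile r2
            rw [hjp2]
            cases hF : (pysplitDot r2).filter (· ≠ []) with
            | nil => exact absurd hF hfne
            | cons f fs =>
              have : jp (c :: t) = w ++ '.' :: jp r2 := by
                simp only [jp, hps, List.filter_cons, hwne, ne_eq, not_false_iff,
                  if_pos, hF]
                simp [pyjoinDot, hwne]
              rw [this]

theorem jp_head_ne_dot (u : List Char) : (jp u).head? ≠ some '.' := by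
  unfold jp
  cases hF : (pysplitDot u).filter (· ≠ []) with
  | nil => simp [pyjoinDot]
  | cons p ps =>
    have hp : p ∈ (pysplitDot u).filter (· ≠ []) := by rw [hF]; simp
    have hmem := List.mem_filter.1 hp
    have hpne : p ≠ [] := by simpa using hmem.2
    have hnd : '.' ∉ p := mem_pysplitDot_no_dot u p hmem.1
    cases hq : p with
    | nil => exact absurd hq hpne
    | cons x xs =>
      have hx : x ≠ '.' := by
        intro h; exact hnd (by simp [hq, h])
      cases ps with
      | nil => simp [pyjoinDot, hq, hx, Ne.symm hx]
      | cons q qs =>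
        simp only [pyjoinDot, hq]
        simp [hx, Ne.symm hx]

theorem sT_take_ne_nil (z : List Char) (hz : z ≠ []) (hh : z.head? ≠ some '.') :
    sT (z.take 15) ≠ [] := by
  cases z with
  | nil => exact absurd rfl hz
  | cons x zs =>
    have hx : x ≠ '.' := by intro h; exact hh (by simp [h])
    have ht : (x :: zs).take 15 = x :: zs.take 14 := rfl
    rw [ht]
    unfold sT
    cases hl : (x :: zs.take 14).getLast? with
    | none => simp at hl
    | some e =>
      by_cases he : e = '.'
      · subst he
        have hne : zs.take 14 ≠ [] := by
          intro h0
          rw [h0] at hl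
          simp at hl
          exact hx hl
        simp only [hl, if_pos rfl]
        simp [List.dropLast_cons_of_ne_nil hne]
      · simp [hl, he]

-- A's step-7 while loop in closed form (for a nonempty answer)
theorem padA_eq (x : List Char) (hx : x ≠ []) :
    padA x = if x.length < 3 then x ++ List.replicate (3 - x.length) (x.getLastD 'a') else x := by
  match x with
  | [a] =>
    rw [padA.eq_def]
    rw [dif_pos (by simp)]
    rw [padA.eq_def]
    rw [dif_pos (by simp)]
    rw [padA.eq_def]
    rw [dif_neg (by simp)]
    simp [List.getLast, List.getLastD, List.replicate]
  | [a, b] =>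
    rw [padA.eq_def]
    rw [dif_pos (by simp)]
    rw [padA.eq_def]
    rw [dif_neg (by simp)]
    simp [List.getLast, List.getLastD, List.replicate]
  | a :: b :: c :: t =>
    rw [padA.eq_def]
    have h3 : ¬ (a :: b :: c :: t).length < 3 := by simp
    rw [dif_neg (fun hh => h3 hh.1), if_neg h3]

theorem sL_guard (x : List Char) :
    (if x ≠ [] ∧ x.head? = some '.' then x.tail else x) = sL x := by
  unfold sL
  by_cases h : x.head? = some '.'
  · have hx : x ≠ [] := by cases x <;> simp_all
    simp [h, hx]
  · simp [h]

theorem sT_def (x : List Char) :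
    (if x.getLast? = some '.' then x.dropLast else x) = sT x := rfl

theorem sT_guard (x : List Char) :
    (if x ≠ [] ∧ x.getLast? = some '.' then x.dropLast else x) = sT x := by
  unfold sT
  by_cases h : x.getLast? = some '.'
  · have hx : x ≠ [] := by cases x <;> simp_all
    simp [h, hx]
  · simp [h]

theorem solution_spec : Claim_equal_solution := by
  intro new_id _
  unfold Spec_solution
  simp only [solution, solution_alt]
  have hcore0 : ((PySem.Str.lower new_id).toList).foldl stepA [] =
      colP false (((PySem.Str.lower new_id).toList).filter keepB) := by
    rw [foldl_stepA]
    simp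
  rw [hcore0]
  set u := ((PySem.Str.lower new_id).toList).filter keepB with hu
  simp only [sL_guard, sT_guard, sT_def]
  rw [core_eq u.length u le_rfl]
  rw [show pyjoinDot ((pysplitDot u).filter (· ≠ [])) = jp u from rfl]
  set y := jp u with hy
  set y1 := if y = [] then ['a'] else y with hy1
  have hy1ne : y1 ≠ [] := by
    rw [hy1]; split_ifs with h
    · simp
    · exact h
  have hy1h : y1.head? ≠ some '.' := by
    rw [hy1]; split_ifs with h
    · simp
    · exact jp_head_ne_dot u
  set y2 := y1.take 15 with hy2
  have h3 : sT y2 ≠ [] := sT_take_ne_nil y1 hy1ne hy1h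
  rw [padA_eq (sT y2) h3]
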